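-- pv_equiv track=rewrite | github.com/anaolisilva/Intro-a-Python | EPs/alinhamento.py | pontuacao
-- ===== SOURCE A (Python) =====
-- DNA = 'ATCG'
--
-- GAP = '_'
--
-- def pontuacao(s, t, ga, la, ldif, lgap):
--     ''' (str, str, int, int, int, int) -> int
--
--     RECEBE duas strings `s` e `t` de mesmo tamanho com zero ou mais gaps
--     representando fitas de DNA; e quatro inteiros `ga`, `la`, `ldif`, `lgap`.
--
--     RETORNA a pontuação do alinhamento entre `s` e `t` calculada da seguinte
--     forma:
--
--        * dois gaps alinhados contam `ga` pontos,
--        * duas letras iguais alinhadas contam `la` pontos,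
--        * duas letras diferentes alinhadas contam `-ldif` pontos (subtrai ldif pontos) e
--        * uma letra alinhada com um gap contam `-lgap` pontos (subtrai lgap pontos).
--
--     Exemplos:
--
--     In  [1]: pontuacao('T_', 'CT', 1, 5, 6, 3)
--     Out [1]: -9
--
--     In  [2]: pontuacao('T_CGTAC', 'T_CG_TC', 1, 5, 6, 3)
--     Out [2]: 12
--
--     In  [3]: pontuacao('T_CGTAC', 'A_CG_T_', 2, 3, 5, 4)
--     Out [3]: -10
--
--     In  [4]: pontuacao('T_CGTA',  'A_CGT_', -1, 5, 3, 2)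
--     Out [4]: 9
--     '''
--     # modifique o código abaixo para conter a sua solução.
--
--     pontuacao = 0
--
--     for i in range(len(s)):
--         if s[i] in DNA:
--             if s[i] == t[i]:
--                 pontuacao += la
--             elif t[i] == GAP:
--                 pontuacao -= lgap
--             else:
--                 pontuacao -= ldif
--         elif s[i] == GAP:
--             if t[i] == GAP:
--                 pontuacao += ga
--             elif t[i] in DNA:
--                 pontuacao -= lgap
--
--
--
--     return pontuacao
-- ===== SOURCE B (Python) =====
-- DNA = 'ATCG'
--
-- GAP = '_'
--
-- def pontuacao(s, t, ga, la, ldif, lgap):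
--     # Classify each aligned pair into a category, tally the categories,
--     # then combine the tallies in one closed arithmetic expression.
--     pairs = list(zip(s, t))
--     eq  = sum(1 for a, b in pairs if a in DNA and a == b)
--     lg  = sum(1 for a, b in pairs if a in DNA and a != b and b == GAP)
--     dif = sum(1 for a, b in pairs if a in DNA and a != b and b != GAP)
--     gg  = sum(1 for a, b in pairs if a == GAP and b == GAP)
--     gl  = sum(1 for a, b in pairs if a == GAP and b in DNA)
--     return ga * gg + la * eq - lgap * (lg + gl) - ldif * dif
-- ===== Notes on version B (the rewrite author's own statement) =====
-- stated objective: alternative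
-- what changed: B replaces A's per-index branching accumulator with a single classification of zip(s,t) pairs into five categories whose tallies are combined in one closed arithmetic expression.
import Mathlib
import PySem

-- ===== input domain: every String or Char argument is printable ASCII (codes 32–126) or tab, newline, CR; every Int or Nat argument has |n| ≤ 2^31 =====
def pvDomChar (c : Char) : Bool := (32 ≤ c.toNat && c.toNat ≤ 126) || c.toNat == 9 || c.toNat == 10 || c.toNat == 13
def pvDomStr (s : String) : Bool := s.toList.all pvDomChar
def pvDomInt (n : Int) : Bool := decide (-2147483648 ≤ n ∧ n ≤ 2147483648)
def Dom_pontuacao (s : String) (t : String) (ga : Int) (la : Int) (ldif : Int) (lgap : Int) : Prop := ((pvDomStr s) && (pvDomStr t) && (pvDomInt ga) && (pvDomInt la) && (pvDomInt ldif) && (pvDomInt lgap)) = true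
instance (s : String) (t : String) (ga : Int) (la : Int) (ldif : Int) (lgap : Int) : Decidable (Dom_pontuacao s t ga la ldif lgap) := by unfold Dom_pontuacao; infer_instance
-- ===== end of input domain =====

-- B tallies the five alignment categories over zip(s,t) and combines the tallies in one
-- closed expression, instead of A's per-index branching accumulator (objective: alternative).

-- DNA = 'ATCG' as a character list (membership 'c in DNA')
def pvDNA : List Char := ['A', 'T', 'C', 'G']

-- ===== PORT A =====
-- per-index loop body of A: s[i] branches, t[i] via pyGet? (none = IndexError, excluded by Pre_)
def pvStepA (ls lt : List Char) (ga la ldif lgap : Int) (acc : Int) (i : Int) : Int :=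
  let c := PySem.List.pyGetD ls i ' '
  if pvDNA.contains c then
    match PySem.List.pyGet? lt i with
    | some d => if c == d then acc + la else if d == '_' then acc - lgap else acc - ldif
    | none => acc
  else if c == '_' then
    match PySem.List.pyGet? lt i with
    | some d => if d == '_' then acc + ga else if pvDNA.contains d then acc - lgap else acc
    | none => acc
  else acc

def pontuacao (s : String) (t : String) (ga : Int) (la : Int) (ldif : Int) (lgap : Int) : Int :=
  (PySem.List.pyRange 0 (PySem.Str.len s) 1).foldl
    (pvStepA s.toList t.toList ga la ldif lgap) 0

-- ===== PORT B =====
def pontuacao_alt (s : String) (t : String) (ga : Int) (la : Int) (ldif : Int) (lgap : Int) : Int :=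
  let pairs := s.toList.zip t.toList
  let eq  : Int := pairs.countP (fun p => pvDNA.contains p.1 && p.1 == p.2)
  let lg  : Int := pairs.countP (fun p => pvDNA.contains p.1 && !(p.1 == p.2) && p.2 == '_')
  let dif : Int := pairs.countP (fun p => pvDNA.contains p.1 && !(p.1 == p.2) && !(p.2 == '_'))
  let gg  : Int := pairs.countP (fun p => p.1 == '_' && p.2 == '_')
  let gl  : Int := pairs.countP (fun p => p.1 == '_' && pvDNA.contains p.2)
  ga * gg + la * eq - lgap * (lg + gl) - ldif * dif

-- ===== PRECONDITION & SPEC =====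
-- Pre_ excludes exactly the inputs on which A raises IndexError: a DNA letter or gap of s
-- at a position past the end of t (A indexes t[i] there).
def Pre_pontuacao (s : String) (t : String) (ga : Int) (la : Int) (ldif : Int) (lgap : Int) : Prop :=
  ((s.toList.drop t.toList.length).all (fun c => !(pvDNA.contains c || c == '_'))) = true
instance (s : String) (t : String) (ga : Int) (la : Int) (ldif : Int) (lgap : Int) : Decidable (Pre_pontuacao s t ga la ldif lgap) := by unfold Pre_pontuacao; infer_instance

def pvWitness_pontuacao : String × String × Int × Int × Int × Int := ("T_CGTAC", "T_CG_TC", 1, 5, 6, 3)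

def Spec_pontuacao (s : String) (t : String) (ga : Int) (la : Int) (ldif : Int) (lgap : Int) (out : Int) : Prop := out = pontuacao_alt s t ga la ldif lgap
instance (s : String) (t : String) (ga : Int) (la : Int) (ldif : Int) (lgap : Int) (out : Int) : Decidable (Spec_pontuacao s t ga la ldif lgap out) := by unfold Spec_pontuacao; infer_instance

-- ===== CLAIM (what is proved, stated in full; the proofs are below) =====
def Claim_equal_pontuacao : Prop := ∀ (s : String) (t : String) (ga : Int) (la : Int) (ldif : Int) (lgap : Int), Dom_pontuacao s t ga la ldif lgap → Pre_pontuacao s t ga la ldif lgap → Spec_pontuacao s t ga la ldif lgap (pontuacao s t ga la ldif lgap)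
-- ===== LEMMAS AND PROOFS =====

-- step of A rephrased on an aligned pair of characters
def pvStepPair (ga la ldif lgap : Int) (acc : Int) (p : Char × Char) : Int :=
  if pvDNA.contains p.1 then
    (if p.1 == p.2 then acc + la else if p.2 == '_' then acc - lgap else acc - ldif)
  else if p.1 == '_' then
    (if p.2 == '_' then acc + ga else if pvDNA.contains p.2 then acc - lgap else acc)
  else acc

lemma pv_fold_eq_zip (ga la ldif lgap : Int) :
    ∀ (ls lt : List Char) (acc : Int),
    ((ls.drop lt.length).all (fun c => !(pvDNA.contains c || c == '_'))) = true →
    (List.range ls.length).foldl (fun (a : Int) (i : Nat) => pvStepA ls lt ga la ldif lgap a (i : Int)) acc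
      = (ls.zip lt).foldl (pvStepPair ga la ldif lgap) acc := by
  intro ls
  induction ls with
  | nil => intro lt acc _; simp
  | cons c ls ih =>
    intro lt acc hpre
    cases lt with
    | nil =>
      simp only [List.drop_zero, List.length_nil] at hpre
      simp only [List.zip_nil_right, List.foldl_nil]
      have hall : ∀ x ∈ c :: ls, (!(pvDNA.contains x || x == '_')) = true := by
        exact fun x hx => List.all_eq_true.mp hpre x hx
      -- every step is the identity
      have hstep : ∀ (a : Int), ∀ i ∈ List.range (c :: ls).length,
          pvStepA (c :: ls) [] ga la ldif lgap a (i : Int) = a := by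
        intro a i hi
        simp only [List.mem_range] at hi
        have hx := hall ((c :: ls).getD i ' ') (by
          have : (c :: ls).getD i ' ' = (c :: ls)[i] := List.getD_eq_getElem _ _ hi
          rw [this]; exact List.getElem_mem hi)
        simp only [Bool.not_eq_true', Bool.or_eq_false_iff] at hx
        simp [pvStepA, PySem.List.pyGetD_natCast, hx.1, hx.2]
      calc (List.range (c :: ls).length).foldl
              (fun (a : Int) (i : Nat) => pvStepA (c :: ls) [] ga la ldif lgap a (i : Int)) acc
          = (List.range (c :: ls).length).foldl (fun (a : Int) (_ : Nat) => a) acc := by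
            exact PySem.List.foldl_congr_mem _ _ _ acc hstep
        _ = acc := by simp
    | cons d lt =>
      have hpre' : ((ls.drop lt.length).all (fun x => !(pvDNA.contains x || x == '_'))) = true := by
        simpa using hpre
      simp only [List.length_cons, List.range_succ_eq_map, List.foldl_cons, List.foldl_map,
        List.zip_cons_cons]
      have h0 : pvStepA (c :: ls) (d :: lt) ga la ldif lgap acc ((0 : Nat) : Int)
          = pvStepPair ga la ldif lgap acc (c, d) := by
        simp [pvStepA, pvStepPair, PySem.List.pyGetD_natCast]
      rw [h0]
      have hshift : ∀ (a : Int), ∀ i ∈ List.range ls.length,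
          pvStepA (c :: ls) (d :: lt) ga la ldif lgap a ((i.succ : Nat) : Int)
            = pvStepA ls lt ga la ldif lgap a (i : Int) := by
        intro a i _
        simp only [pvStepA, PySem.List.pyGetD_natCast, PySem.List.pyGet?_natCast,
          Nat.succ_eq_add_one, List.getD_cons_succ, List.getElem?_cons_succ]
      have h2 := PySem.List.foldl_congr_mem (List.range ls.length)
        (fun (x : Int) (y : Nat) => pvStepA (c :: ls) (d :: lt) ga la ldif lgap x ((y.succ : Nat) : Int))
        (fun (a : Int) (i : Nat) => pvStepA ls lt ga la ldif lgap a (i : Int))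
        (pvStepPair ga la ldif lgap acc (c, d)) hshift
      exact h2.trans (ih lt (pvStepPair ga la ldif lgap acc (c, d)) hpre')

lemma pv_dna_ne_gap (c : Char) (h : pvDNA.contains c = true) : (c == '_') = false := by
  simp only [pvDNA, List.contains_eq_mem, List.mem_cons, List.not_mem_nil, or_false,
    decide_eq_true_eq] at h
  rcases h with h | h | h | h <;> simp [h]

lemma pv_zip_eq_counts (ga la ldif lgap : Int) :
    ∀ (l : List (Char × Char)) (acc : Int),
    l.foldl (pvStepPair ga la ldif lgap) acc
      = acc + ga * (l.countP (fun p => p.1 == '_' && p.2 == '_') : Int)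
            + la * (l.countP (fun p => pvDNA.contains p.1 && p.1 == p.2) : Int)
            - lgap * ((l.countP (fun p => pvDNA.contains p.1 && !(p.1 == p.2) && p.2 == '_') : Int)
                      + (l.countP (fun p => p.1 == '_' && pvDNA.contains p.2) : Int))
            - ldif * (l.countP (fun p => pvDNA.contains p.1 && !(p.1 == p.2) && !(p.2 == '_')) : Int) := by
  intro l
  induction l with
  | nil => intro acc; simp
  | cons p l ih =>
    intro acc
    simp only [List.foldl_cons, List.countP_cons, ih]
    by_cases h1 : pvDNA.contains p.1 = true
    · have hg1 : (p.1 == '_') = false := pv_dna_ne_gap _ h1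
      by_cases h2 : (p.1 == p.2) = true
      · have hg2 : (p.2 == '_') = false := by
          have : p.1 = p.2 := by simpa using h2
          rw [← this]; exact hg1
        simp only [pvStepPair, h1, h2, hg1, hg2]
        push_cast; ring_nf; simp [h1, h2, hg1, hg2]
        try ring
      · by_cases h3 : (p.2 == '_') = true
        · simp only [pvStepPair, h1, h2, hg1, h3]
          push_cast; ring_nf; simp [h1, h2, hg1, h3]
          try ring
        · simp only [pvStepPair, h1, h2, hg1, h3]
          push_cast; ring_nf; simp [h1, h2, hg1, h3]
          try ring
    · by_cases h4 : (p.1 == '_') = true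
      · by_cases h3 : (p.2 == '_') = true
        · have hg2 : pvDNA.contains p.2 = false := by
            have he : p.2 = '_' := by simpa using h3
            rw [he]
            decide
          simp only [pvStepPair, h1, h4, h3, hg2]
          push_cast; ring_nf; simp [h1, h4, h3, hg2]
          try ring
        · by_cases h5 : pvDNA.contains p.2 = true
          · simp only [pvStepPair, h1, h4, h3, h5]
            push_cast; ring_nf; simp [h1, h4, h3, h5]
            try ring
          · simp only [pvStepPair, h1, h4, h3, h5]
            push_cast; ring_nf; simp [h1, h4, h3, h5]
            try ring
      · simp only [pvStepPair, h1, h4]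
        push_cast; ring_nf; simp [h1, h4]
        try ring

-- ===== VERDICT (by name: the statement is the Claim_ definition above) =====
theorem pontuacao_spec : Claim_equal_pontuacao := by
  intro s t ga la ldif lgap _ hpre
  unfold Spec_pontuacao pontuacao pontuacao_alt
  have h1 : (PySem.List.pyRange 0 (PySem.Str.len s) 1).foldl
      (pvStepA s.toList t.toList ga la ldif lgap) 0
      = (List.range s.toList.length).foldl
          (fun (a : Int) (i : Nat) => pvStepA s.toList t.toList ga la ldif lgap a (i : Int)) 0 := by
    rw [PySem.Str.len_eq, show ((s.toList.length : Int)) = ((s.toList.length : Nat) : Int) from rfl,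
      PySem.List.pyRange_zero_nat, List.foldl_map]
  rw [h1, pv_fold_eq_zip ga la ldif lgap s.toList t.toList 0 hpre,
    pv_zip_eq_counts ga la ldif lgap]
  ring
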